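-- pv_equiv track=rewrite | github.com/nickhealthy/python-algorithm | 21_01_07/[programmers]베스트앨범.py | solution
-- ===== SOURCE A (Python) =====
-- def solution(genres, plays):
--     di = {}
--
--     for idx, genre in enumerate(genres):
--         if genre not in di.keys():
--             di[genre] = [(idx, plays[idx])]
--         else:
--             di[genre].append((idx, plays[idx]))
--
--     for i in di.keys():
--         di[i].sort(key=lambda x : x[1], reverse=True)
--
--
--     sorted_di= sorted(list(di.values()), key=lambda x : sum(x2[1] for x2 in x), reverse=True)
--
--     answer = []
--
--     for i in sorted_di:
--         for j in i[:2]: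
--             answer.append(j[0])
--
--     return answer
-- ===== SOURCE B (Python) =====
-- def solution(genres, plays):
--     total, first, records = {}, {}, []
--     for i, g in enumerate(genres):
--         p = plays[i]
--         if g not in first:
--             first[g] = len(first)
--         total[g] = total.get(g, 0) + p
--         records.append((i, g, p))
--     records.sort(key=lambda r: (-total[r[1]], first[r[1]], -r[2], r[0]))
--     count, answer = {}, []
--     for i, g, p in records:
--         if count.get(g, 0) < 2:
--             answer.append(i)
--             count[g] = count.get(g, 0) + 1
--     return answer
-- ===== Notes on version B (the rewrite author's own statement) =====
-- stated objective: alternative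
-- what changed: Replaces per-genre sorts plus a sort of the grouped lists by one global sort of all song records under the composite key (-genre_total, genre_first_seen, -play, idx) followed by a single counting pass that keeps at most two songs per genre.
import Mathlib
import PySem

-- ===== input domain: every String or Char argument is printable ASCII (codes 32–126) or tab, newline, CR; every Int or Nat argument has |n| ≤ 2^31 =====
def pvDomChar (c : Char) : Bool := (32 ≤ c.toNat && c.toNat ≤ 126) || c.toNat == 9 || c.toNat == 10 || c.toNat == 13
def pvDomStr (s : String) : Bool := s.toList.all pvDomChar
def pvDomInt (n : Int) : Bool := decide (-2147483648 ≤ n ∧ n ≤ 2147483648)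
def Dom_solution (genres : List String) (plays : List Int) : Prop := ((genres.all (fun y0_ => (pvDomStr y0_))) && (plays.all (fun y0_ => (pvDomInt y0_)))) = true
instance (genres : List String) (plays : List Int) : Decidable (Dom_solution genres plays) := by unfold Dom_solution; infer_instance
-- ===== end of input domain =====

-- ===== PORT A =====
-- Port of A. plays[idx] is PySem.List.pyGetD plays idx 0: exact whenever idx < plays.length,
-- which Pre_solution guarantees (Python raises IndexError otherwise).
def solution (genres : List String) (plays : List Int) : List Int :=
  let di : PySem.Dict String (List (Int × Int)) :=
    (PySem.List.enumerate genres).foldl (fun d e =>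
      if !(d.contains e.2) then d.insert e.2 [(e.1, PySem.List.pyGetD plays e.1 0)]
      else d.modify e.2 [] (fun l => l ++ [(e.1, PySem.List.pyGetD plays e.1 0)])) PySem.Dict.empty
  let di2 := di.keys.foldl (fun d k => d.modify k [] (fun l => PySem.List.sorted l (fun x => x.2) true)) di
  let sorted_di := PySem.List.sorted di2.values (fun x => (x.map (fun x2 => x2.2)).sum) true
  sorted_di.foldl (fun answer i =>
    (PySem.List.slice i none (some 2)).foldl (fun a j => a ++ [j.1]) answer) []

-- ===== PORT B =====
-- Port of B (Source B): one pass building total/first/records, one global sort by the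
-- composite tuple key (Python tuple comparison = nested Lex), one counting pass.
def solution_alt (genres : List String) (plays : List Int) : List Int :=
  let st := (PySem.List.enumerate genres).foldl
    (fun (st : PySem.Dict String Int × PySem.Dict String Int × List (Int × String × Int)) e =>
      (st.1.insert e.2 (st.1.getD e.2 0 + PySem.List.pyGetD plays e.1 0),
       if st.2.1.contains e.2 then st.2.1 else st.2.1.insert e.2 (st.2.1.size : Int),
       st.2.2 ++ [(e.1, e.2, PySem.List.pyGetD plays e.1 0)]))
    (PySem.Dict.empty, PySem.Dict.empty, [])
  let records := PySem.List.sorted st.2.2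
    (fun r => toLex ((-(st.1.getD r.2.1 0) : Int),
               toLex (((st.2.1).getD r.2.1 0 : Int), toLex ((-r.2.2 : Int), r.1)))) false
  (records.foldl (fun (s : PySem.Dict String Int × List Int) r =>
      if s.1.getD r.2.1 0 < 2 then (s.1.insert r.2.1 (s.1.getD r.2.1 0 + 1), s.2 ++ [r.1]) else s)
    (PySem.Dict.empty, [])).2

-- ===== PRECONDITION & SPEC =====
-- Pre_solution excludes exactly the inputs where A raises IndexError (plays[idx] with
-- idx ≥ len(plays)); B raises there too.
def Pre_solution (genres : List String) (plays : List Int) : Prop :=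
  genres.length ≤ plays.length
instance (genres : List String) (plays : List Int) : Decidable (Pre_solution genres plays) := by
  unfold Pre_solution; infer_instance
def pvWitness_solution : List String × List Int := (["pop", "rock", "pop"], [500, 600, 500])
def Spec_solution (genres : List String) (plays : List Int) (out : List Int) : Prop := out = solution_alt genres plays
instance (genres : List String) (plays : List Int) (out : List Int) : Decidable (Spec_solution genres plays out) := by unfold Spec_solution; infer_instance

-- ===== CLAIM (what is proved, stated in full; the proofs are below) =====
def Claim_equal_solution : Prop := ∀ (genres : List String) (plays : List Int), Dom_solution genres plays → Pre_solution genres plays → Spec_solution genres plays (solution genres plays)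

-- ===== LEMMAS AND PROOFS =====

-- Proof-side ghost objects: the record list and per-genre data both ports compute with.

def pvRecs (genres : List String) (plays : List Int) : List (Int × String × Int) :=
  (PySem.List.enumerate genres).map (fun e => (e.1, e.2, PySem.List.pyGetD plays e.1 0))

def pvFilt (rs : List (Int × String × Int)) (g : String) : List (Int × String × Int) :=
  rs.filter (fun r => r.2.1 == g)

def pvG (rs : List (Int × String × Int)) : List String :=
  PySem.Set.ofList (rs.map (fun r => r.2.1))

def pvTot (rs : List (Int × String × Int)) (g : String) : Int :=
  ((pvFilt rs g).map (fun r => r.2.2)).sum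

def pvRank (rs : List (Int × String × Int)) (g : String) : Int :=
  ((pvG rs).idxOf g : Nat)

def pvFo (rs : List (Int × String × Int)) (g : String) : Int :=
  (((pvFilt rs g).head?).map (fun r => r.1)).getD 0

def pvSgR (rs : List (Int × String × Int)) (g : String) : List (Int × String × Int) :=
  PySem.List.sorted (pvFilt rs g) (fun r => r.2.2) true

def pvPhi (r : Int × String × Int) : Int × Int := (r.1, r.2.2)

def pvGrp (rs : List (Int × String × Int)) (g : String) : List (Int × Int) :=
  (pvFilt rs g).map pvPhi

def pvSg (rs : List (Int × String × Int)) (g : String) : List (Int × Int) :=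
  PySem.List.sorted (pvGrp rs g) (fun x => x.2) true

def pvMinIdx (l : List (Int × Int)) : Int := ((l.map Prod.fst).min?).getD 0

def pvGord (rs : List (Int × String × Int)) : List String :=
  PySem.List.sorted (pvG rs) (fun g => toLex (-(pvTot rs g), pvRank rs g)) false

def pvKeyB (rs : List (Int × String × Int)) (r : Int × String × Int) :
    Lex (Int × Lex (Int × Lex (Int × Int))) :=
  toLex (-(pvTot rs r.2.1), toLex (pvRank rs r.2.1, toLex (-r.2.2, r.1)))

def pvLrev {α : Type} (key pos : α → Int) (a b : α) : Prop :=
  key b < key a ∨ (key a = key b ∧ pos a < pos b)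

-- the three loop bodies, as functions of a record
def pvStepA (d : PySem.Dict String (List (Int × Int))) (r : Int × String × Int) :
    PySem.Dict String (List (Int × Int)) :=
  if !(d.contains r.2.1) then d.insert r.2.1 [(r.1, r.2.2)]
  else d.modify r.2.1 [] (fun l => l ++ [(r.1, r.2.2)])

def pvStepS (d : PySem.Dict String (List (Int × Int))) (k : String) :
    PySem.Dict String (List (Int × Int)) :=
  d.modify k [] (fun l => PySem.List.sorted l (fun x => x.2) true)

def pvStepT (d : PySem.Dict String Int) (r : Int × String × Int) : PySem.Dict String Int :=
  d.insert r.2.1 (d.getD r.2.1 0 + r.2.2)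

def pvStepF (d : PySem.Dict String Int) (r : Int × String × Int) : PySem.Dict String Int :=
  if d.contains r.2.1 then d else d.insert r.2.1 (d.size : Int)

def pvStepC (s : PySem.Dict String Int × List Int) (r : Int × String × Int) :
    PySem.Dict String Int × List Int :=
  if s.1.getD r.2.1 0 < 2 then (s.1.insert r.2.1 (s.1.getD r.2.1 0 + 1), s.2 ++ [r.1]) else s

-- ===== generic dictionary / list facts =====

theorem pvKeysInsertMem {ν : Type} (d : PySem.Dict String ν) (k : String) (v : ν)
    (h : d.contains k = true) : (d.insert k v).keys = d.keys := by
  simp only [PySem.Dict.insert, h, if_true, PySem.Dict.keys]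
  rw [List.map_map]; apply List.map_congr_left; intro p _
  by_cases hp : p.1 = k <;> simp [hp]

theorem pvKeysInsertNew {ν : Type} (d : PySem.Dict String ν) (k : String) (v : ν)
    (h : d.contains k = false) : (d.insert k v).keys = d.keys ++ [k] := by
  simp [PySem.Dict.insert, h, PySem.Dict.keys]

theorem pvGetDNotMem {ν : Type} (d : PySem.Dict String ν) (g : String) (dflt : ν)
    (h : ¬ g ∈ d.keys) : d.getD g dflt = dflt := by
  have : d.get? g = none := by
    simp only [PySem.Dict.get?_eq_none_iff_contains, PySem.Dict.contains_eq_decide_mem_keys,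
      decide_eq_false_iff_not]
    exact h
  simp [PySem.Dict.getD, this]

theorem pvSizeEqKeysLength {ν : Type} (d : PySem.Dict String ν) : d.size = d.keys.length := by
  simp [PySem.Dict.size, PySem.Dict.keys]

theorem pvSetAddEq (s : PySem.Set String) (x : String) :
    PySem.Set.add s x = if x ∈ s then s else s ++ [x] := by
  simp [PySem.Set.add, PySem.Set.contains]

theorem pvOfListAppendSingleton (xs : List String) (x : String) :
    PySem.Set.ofList (xs ++ [x]) = PySem.Set.add (PySem.Set.ofList xs) x := by
  rw [PySem.Set.ofList_eq_foldl, PySem.Set.ofList_eq_foldl, List.foldl_append]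
  rfl

theorem pvSumIf (l : List String) (hnd : l.Nodup) (a : String) (c : Nat) :
    (l.map (fun g => if a = g then c else 0)).sum = if a ∈ l then c else 0 := by
  induction l with
  | nil => simp
  | cons x t ih =>
    rcases List.nodup_cons.mp hnd with ⟨hx, ht⟩
    by_cases hax : a = x
    · subst hax
      simp [List.sum_cons, ih ht, hx]
    · simp [List.sum_cons, hax, ih ht]

theorem pvIdxOfLtIff {β : Type} [BEq β] [LawfulBEq β] (l : List β) (f : β → Int)
    (hpw : l.Pairwise (fun a b => f a < f b)) (a b : β) (ha : a ∈ l) (hb : b ∈ l) :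
    (l.idxOf a < l.idxOf b ↔ f a < f b) := by
  have hlen : ∀ x ∈ l, l.idxOf x < l.length := fun x hx => List.idxOf_lt_length_of_mem hx
  have key : ∀ i j (hi : i < l.length) (hj : j < l.length), i < j → f l[i] < f l[j] :=
    List.pairwise_iff_getElem.mp hpw
  have hga : l[l.idxOf a]'(hlen a ha) = a := List.getElem_idxOf _
  have hgb : l[l.idxOf b]'(hlen b hb) = b := List.getElem_idxOf _
  constructor
  · intro h
    have := key _ _ (hlen a ha) (hlen b hb) h
    rwa [hga, hgb] at this
  · intro h
    rcases lt_trichotomy (l.idxOf a) (l.idxOf b) with h' | h' | h'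
    · exact h'
    · exfalso
      simp only [h'] at hga
      rw [hga] at hgb; subst hgb; exact lt_irrefl _ h
    · exfalso
      have := key _ _ (hlen b hb) (hlen a ha) h'
      rw [hga, hgb] at this; omega

theorem pvPairwiseFlatMap {α β : Type} (R : β → β → Prop) (gs : List α) (f : α → List β)
    (hin : ∀ g ∈ gs, (f g).Pairwise R)
    (hcross : gs.Pairwise (fun g g' => ∀ a ∈ f g, ∀ b ∈ f g', R a b)) :
    (gs.flatMap f).Pairwise R := by
  induction gs with
  | nil => simp
  | cons g t ih =>
    rw [List.flatMap_cons, List.pairwise_append]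
    rcases List.pairwise_cons.mp hcross with ⟨hg, ht⟩
    refine ⟨hin g (by simp), ih (fun g' hg' => hin g' (by simp [hg'])) ht, ?_⟩
    intro a hag b hbt
    rcases List.mem_flatMap.mp hbt with ⟨g', hg', hbg'⟩
    exact hg g' hg' a hag b hbg'

-- ===== stability of Python's stable reverse sort =====

theorem pvInsertByStab {α : Type} (key pos : α → Int) (x : α) (acc : List α)
    (hacc : acc.Pairwise (pvLrev key pos)) (hpos : ∀ a ∈ acc, pos a < pos x) :
    (PySem.List.insertBy (fun a b => decide (key b < key a)) x acc).Pairwise (pvLrev key pos) := by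
  induction acc with
  | nil => simp [PySem.List.insertBy]
  | cons y t ih =>
    rcases List.pairwise_cons.mp hacc with ⟨hy, ht⟩
    by_cases h : key y < key x
    · simp only [PySem.List.insertBy, h, decide_true, if_true]
      refine List.pairwise_cons.mpr ⟨?_, hacc⟩
      intro z hz
      rcases List.mem_cons.mp hz with rfl | hz
      · exact Or.inl h
      · rcases hy z hz with h' | ⟨h', _⟩
        · exact Or.inl (lt_trans h' h)
        · exact Or.inl (by omega)
    · simp only [PySem.List.insertBy, h, decide_false]
      refine List.pairwise_cons.mpr ⟨?_, ih ht (fun a ha => hpos a (by simp [ha]))⟩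
      intro z hz
      rcases (PySem.List.mem_insertBy _ _ _ _).mp hz with rfl | hz
      · rcases lt_or_eq_of_le (le_of_not_gt h) with h' | h'
        · exact Or.inl h'
        · exact Or.inr ⟨h'.symm, hpos y (by simp)⟩
      · exact hy z hz

theorem pvSortedRevStab {α : Type} (key pos : α → Int) (xs : List α)
    (hxs : xs.Pairwise (fun a b => pos a < pos b)) :
    (PySem.List.sorted xs key true).Pairwise (pvLrev key pos) := by
  rw [PySem.List.sorted_rev_eq_foldl_insertBy]
  suffices h : ∀ (l : List α) (acc : List α), l.Pairwise (fun a b => pos a < pos b) →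
      acc.Pairwise (pvLrev key pos) → (∀ a ∈ acc, ∀ x ∈ l, pos a < pos x) →
      (l.foldl (fun acc x => PySem.List.insertBy (fun a b => decide (key b < key a)) x acc) acc).Pairwise (pvLrev key pos) by
    exact h xs [] hxs (by simp) (by simp)
  intro l
  induction l with
  | nil => intro acc _ hacc _; simpa using hacc
  | cons x t ih =>
    intro acc hl hacc hfut
    rcases List.pairwise_cons.mp hl with ⟨hx, ht⟩
    simp only [List.foldl_cons]
    apply ih _ ht
    · exact pvInsertByStab key pos x acc hacc (fun a ha => hfut a ha x (by simp))
    · intro a ha x' hx'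
      rcases (PySem.List.mem_insertBy _ _ _ _).mp ha with rfl | ha
      · exact hx x' hx'
      · exact hfut a ha x' (by simp [hx'])

theorem pvLrevAsymm {α : Type} (key pos : α → Int) (a b : α)
    (h1 : pvLrev key pos a b) (h2 : pvLrev key pos b a) : False := by
  unfold pvLrev at h1 h2
  rcases h1 with h1 | ⟨h1, h1'⟩ <;> rcases h2 with h2 | ⟨h2, h2'⟩ <;> omega

theorem pvInsertByMap {α β : Type} (φ : α → β) (bf : β → β → Bool) (bf' : α → α → Bool)
    (h : ∀ a b, bf (φ a) (φ b) = bf' a b) (x : α) (l : List α) :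
    PySem.List.insertBy bf (φ x) (l.map φ) = (PySem.List.insertBy bf' x l).map φ := by
  induction l with
  | nil => simp [PySem.List.insertBy]
  | cons y t ih =>
    simp only [List.map_cons, PySem.List.insertBy, h x y]
    by_cases hb : bf' x y
    · simp [hb]
    · simp only [hb]
      rw [ih]; simp

theorem pvSortedRevMap {α β : Type} (φ : α → β) (key : β → Int) (l : List α) :
    PySem.List.sorted (l.map φ) key true
      = (PySem.List.sorted l (fun a => key (φ a)) true).map φ := by
  rw [PySem.List.sorted_rev_eq_foldl_insertBy, PySem.List.sorted_rev_eq_foldl_insertBy]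
  rw [List.foldl_map]
  suffices h : ∀ (l : List α) (acc : List α),
      (l.foldl (fun acc x => PySem.List.insertBy (fun a b => decide (key b < key a)) (φ x) acc) (acc.map φ))
        = (l.foldl (fun acc x => PySem.List.insertBy (fun a b => decide (key (φ b) < key (φ a))) x acc) acc).map φ by
    simpa using h l []
  intro l
  induction l with
  | nil => intro acc; simp
  | cons x t ih =>
    intro acc
    simp only [List.foldl_cons]
    rw [pvInsertByMap φ _ _ (fun a b => rfl) x acc]
    exact ih _

-- ===== characterisation of the record list =====

theorem pvEnumerateLB (genres : List String) (k : Int) :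
    ∀ e ∈ PySem.List.enumerate genres k, k ≤ e.1 := by
  induction genres generalizing k with
  | nil => simp [PySem.List.enumerate]
  | cons x t ih =>
    intro e he
    simp only [PySem.List.enumerate] at he
    rcases List.mem_cons.mp he with rfl | he
    · simp
    · have := ih (k + 1) e he; omega

theorem pvEnumeratePairwise (genres : List String) (k : Int) :
    (PySem.List.enumerate genres k).Pairwise (fun a b => a.1 < b.1) := by
  induction genres generalizing k with
  | nil => simp [PySem.List.enumerate]
  | cons x t ih =>
    simp only [PySem.List.enumerate]
    refine List.pairwise_cons.mpr ⟨?_, ih (k + 1)⟩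
    intro e he
    have := pvEnumerateLB t (k + 1) e he
    simp; omega

theorem pvRecsPairwise (genres : List String) (plays : List Int) :
    (pvRecs genres plays).Pairwise (fun a b => a.1 < b.1) := by
  unfold pvRecs
  rw [List.pairwise_map]
  exact pvEnumeratePairwise genres 0

-- ===== per-genre facts =====

theorem pvFiltCons (rs : List (Int × String × Int)) (r : Int × String × Int) (g : String) :
    pvFilt (r :: rs) g = (if r.2.1 = g then [r] else []) ++ pvFilt rs g := by
  unfold pvFilt
  by_cases h : r.2.1 = g <;> simp [h]

theorem pvFiltPairwise (rs : List (Int × String × Int))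
    (hpi : rs.Pairwise (fun a b => a.1 < b.1)) (g : String) :
    (pvFilt rs g).Pairwise (fun a b => a.1 < b.1) := by
  exact List.Pairwise.sublist List.filter_sublist hpi

theorem pvMemFiltGenre (rs : List (Int × String × Int)) (g : String)
    (r : Int × String × Int) (h : r ∈ pvFilt rs g) : r.2.1 = g := by
  have := (List.mem_filter.mp h).2
  simpa using this

theorem pvFiltNeNil (rs : List (Int × String × Int)) (g : String) (h : g ∈ pvG rs) :
    pvFilt rs g ≠ [] := by
  unfold pvG at h
  rw [PySem.Set.mem_ofList] at h
  rcases List.mem_map.mp h with ⟨r, hr, rfl⟩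
  intro hnil
  have : r ∈ pvFilt rs r.2.1 := List.mem_filter.mpr ⟨hr, by simp⟩
  rw [hnil] at this; exact List.not_mem_nil this

theorem pvMemSgRGenre (rs : List (Int × String × Int)) (g : String)
    (r : Int × String × Int) (h : r ∈ pvSgR rs g) : r.2.1 = g := by
  unfold pvSgR at h
  rw [PySem.List.mem_sorted] at h
  exact pvMemFiltGenre rs g r h

theorem pvSgEqMapSgR (rs : List (Int × String × Int)) (g : String) :
    pvSg rs g = (pvSgR rs g).map pvPhi := by
  unfold pvSg pvGrp pvSgR
  rw [pvSortedRevMap pvPhi (fun x => x.2) (pvFilt rs g)]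
  rfl

theorem pvSumkeySg (rs : List (Int × String × Int)) (g : String) :
    ((pvSg rs g).map (fun x2 => x2.2)).sum = pvTot rs g := by
  have h1 : (pvSg rs g).Perm (pvGrp rs g) := PySem.List.sorted_perm _ _ _
  have h2 : ((pvSg rs g).map (fun x2 => x2.2)).Perm ((pvGrp rs g).map (fun x2 => x2.2)) :=
    h1.map _
  rw [h2.sum_eq]
  unfold pvGrp pvTot
  rw [List.map_map]
  rfl

theorem pvMinIdxSg (rs : List (Int × String × Int))
    (hpi : rs.Pairwise (fun a b => a.1 < b.1)) (g : String) (hg : g ∈ pvG rs) :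
    pvMinIdx (pvSg rs g) = pvFo rs g := by
  have hne := pvFiltNeNil rs g hg
  rcases hf : pvFilt rs g with _ | ⟨r0, t⟩
  · exact absurd hf hne
  have hpw : (pvFilt rs g).Pairwise (fun a b => a.1 < b.1) := pvFiltPairwise rs hpi g
  rw [hf] at hpw
  have hhead : ∀ r ∈ t, r0.1 < r.1 := (List.pairwise_cons.mp hpw).1
  have hmemSg : ∀ x, x ∈ pvSg rs g ↔ x ∈ pvGrp rs g := by
    intro x; exact PySem.List.mem_sorted _ _ _ _
  have hmin : ((pvSg rs g).map Prod.fst).min? = some r0.1 := by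
    rw [List.min?_eq_some_iff_subtype]
    constructor
    · refine List.mem_map.mpr ⟨pvPhi r0, ?_, rfl⟩
      rw [hmemSg]
      exact List.mem_map.mpr ⟨r0, by rw [hf]; simp, rfl⟩
    · intro b hb
      rcases List.mem_map.mp hb with ⟨x, hx, rfl⟩
      rw [hmemSg] at hx
      rcases List.mem_map.mp hx with ⟨r, hr, rfl⟩
      rw [hf] at hr
      rcases List.mem_cons.mp hr with rfl | hr
      · exact le_refl _
      · exact le_of_lt (hhead r hr)
  unfold pvMinIdx pvFo
  rw [hmin, hf]
  rfl

theorem pvGPairwiseFo (rs : List (Int × String × Int))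
    (hpi : rs.Pairwise (fun a b => a.1 < b.1)) :
    (pvG rs).Pairwise (fun g g' => pvFo rs g < pvFo rs g') := by
  induction rs using List.reverseRecOn with
  | nil => simp [pvG, PySem.Set.ofList]
  | append_singleton rs r ih =>
    rcases List.pairwise_append.mp hpi with ⟨hpre, _, hcross⟩
    have hlast : ∀ a ∈ rs, a.1 < r.1 := fun a ha => hcross a ha r (by simp)
    -- the genre set after appending r
    have hGapp : pvG (rs ++ [r]) = PySem.Set.add (pvG rs) r.2.1 := by
      unfold pvG
      rw [List.map_append]
      exact pvOfListAppendSingleton _ _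
    -- fo is some element's index
    have hfoMem : ∀ g ∈ pvG rs, ∃ r0 ∈ rs, pvFo rs g = r0.1 := by
      intro g hg
      have hne := pvFiltNeNil rs g hg
      rcases hf : pvFilt rs g with _ | ⟨r0, t⟩
      · exact absurd hf hne
      refine ⟨r0, ?_, by unfold pvFo; rw [hf]; rfl⟩
      have : r0 ∈ pvFilt rs g := by rw [hf]; simp
      exact List.mem_of_mem_filter this
    -- fo is unchanged on old genres
    have hfoStab : ∀ g ∈ pvG rs, pvFo (rs ++ [r]) g = pvFo rs g := by
      intro g hg
      have hne := pvFiltNeNil rs g hg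
      unfold pvFo pvFilt
      rw [List.filter_append, List.head?_append]
      rcases hf : pvFilt rs g with _ | ⟨r0, t⟩
      · exact absurd hf hne
      unfold pvFilt at hf
      rw [hf]
      rfl
    by_cases hmem : r.2.1 ∈ pvG rs
    · rw [hGapp, pvSetAddEq, if_pos hmem]
      refine (ih hpre).imp_of_mem ?_
      intro a b ha hb h
      rw [hfoStab a ha, hfoStab b hb]
      exact h
    · rw [hGapp, pvSetAddEq, if_neg hmem]
      rw [List.pairwise_append]
      refine ⟨(ih hpre).imp_of_mem ?_, by simp, ?_⟩
      · intro a b ha hb h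
        rw [hfoStab a ha, hfoStab b hb]
        exact h
      · intro g hg b hb
        rcases List.mem_singleton.mp hb with rfl
        have hfilt_nil : pvFilt rs r.2.1 = [] := by
          unfold pvFilt
          rw [List.filter_eq_nil_iff]
          intro a ha hpa
          apply hmem
          unfold pvG
          rw [PySem.Set.mem_ofList]
          refine List.mem_map.mpr ⟨a, ha, ?_⟩
          simpa using hpa
        have hfoNew : pvFo (rs ++ [r]) r.2.1 = r.1 := by
          unfold pvFo pvFilt
          rw [List.filter_append]
          unfold pvFilt at hfilt_nil
          rw [hfilt_nil]
          simp
        rw [hfoNew, hfoStab g hg]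
        rcases hfoMem g hg with ⟨r0, hr0, heq⟩
        rw [heq]
        exact hlast r0 hr0

theorem pvRankLtIffFo (rs : List (Int × String × Int))
    (hpi : rs.Pairwise (fun a b => a.1 < b.1)) (g g' : String)
    (hg : g ∈ pvG rs) (hg' : g' ∈ pvG rs) :
    (pvRank rs g < pvRank rs g' ↔ pvFo rs g < pvFo rs g') := by
  unfold pvRank
  rw [Nat.cast_lt]
  exact pvIdxOfLtIff (pvG rs) (pvFo rs) (pvGPairwiseFo rs hpi) g g' hg hg'

theorem pvGordPairwise (rs : List (Int × String × Int)) :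
    (pvGord rs).Pairwise
      (fun g g' => pvTot rs g' < pvTot rs g ∨
        (pvTot rs g = pvTot rs g' ∧ pvRank rs g < pvRank rs g')) := by
  have hle := PySem.List.sorted_pairwise (pvG rs) (fun g => toLex (-(pvTot rs g), pvRank rs g))
  have hperm := PySem.List.sorted_perm (pvG rs) (fun g => toLex (-(pvTot rs g), pvRank rs g)) false
  have hnd : (pvGord rs).Nodup := hperm.symm.nodup (PySem.Set.nodup_ofList _)
  have hcomb := hle.and hnd
  refine hcomb.imp_of_mem ?_
  intro a b ha hb ⟨hab, hne⟩
  have hmema : a ∈ pvG rs := by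
    have := (PySem.List.mem_sorted (pvG rs) _ false a).mp ha
    exact this
  have hmemb : b ∈ pvG rs := by
    exact (PySem.List.mem_sorted (pvG rs) _ false b).mp hb
  have hkne : (toLex (-(pvTot rs a), pvRank rs a)) ≠ (toLex (-(pvTot rs b), pvRank rs b)) := by
    intro h
    have h2 := congrArg (fun x => (ofLex x).2) h
    simp only [ofLex_toLex] at h2
    unfold pvRank at h2
    have h3 : (pvG rs).idxOf a = (pvG rs).idxOf b := by exact_mod_cast h2
    have hga : (pvG rs)[(pvG rs).idxOf a]'(List.idxOf_lt_length_of_mem hmema) = a :=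
      List.getElem_idxOf _
    have hgb : (pvG rs)[(pvG rs).idxOf b]'(List.idxOf_lt_length_of_mem hmemb) = b :=
      List.getElem_idxOf _
    simp only [h3] at hga
    rw [hga] at hgb
    exact hne hgb
  have hlt := lt_of_le_of_ne hab hkne
  rw [Prod.Lex.lt_iff] at hlt
  simp only [ofLex_toLex] at hlt
  rcases hlt with h | ⟨h1, h2⟩
  · left; omega
  · right; exact ⟨by omega, h2⟩

theorem pvADict (rs : List (Int × String × Int)) :
    ∀ d : PySem.Dict String (List (Int × Int)),
      (rs.foldl pvStepA d).keys = PySem.Set.update d.keys (rs.map (fun r => r.2.1))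
      ∧ ∀ g, (rs.foldl pvStepA d).getD g [] = d.getD g [] ++ pvGrp rs g := by
  induction rs with
  | nil =>
    intro d
    refine ⟨rfl, ?_⟩
    intro g
    simp [pvGrp, pvFilt]
  | cons r t ih =>
    intro d
    have hgcons : ∀ g, pvGrp (r :: t) g = (if r.2.1 = g then [pvPhi r] else []) ++ pvGrp t g := by
      intro g
      unfold pvGrp
      rw [pvFiltCons, List.map_append]
      by_cases h : r.2.1 = g <;> simp [h]
    have hstep : (pvStepA d r).keys = PySem.Set.add d.keys r.2.1 := by
      unfold pvStepA
      by_cases hc : d.contains r.2.1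
      · have hmem : r.2.1 ∈ d.keys := by
          rw [PySem.Dict.contains_eq_decide_mem_keys] at hc
          exact of_decide_eq_true hc
        rw [hc]
        simp only [Bool.not_true, Bool.false_eq_true, if_false]
        rw [PySem.Dict.keys_modify, pvKeysInsertMem _ _ _ hc, pvSetAddEq, if_pos hmem]
      · have hc' : d.contains r.2.1 = false := by simpa using hc
        have hmem : ¬ r.2.1 ∈ d.keys := by
          rw [PySem.Dict.contains_eq_decide_mem_keys] at hc'
          simpa using hc'
        rw [hc']
        simp only [Bool.not_false, if_true]
        rw [pvKeysInsertNew _ _ _ hc', pvSetAddEq, if_neg hmem]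
    have hgd : ∀ g, (pvStepA d r).getD g []
        = d.getD g [] ++ (if r.2.1 = g then [pvPhi r] else []) := by
      intro g
      unfold pvStepA
      by_cases hc : d.contains r.2.1
      · rw [hc]
        simp only [Bool.not_true, Bool.false_eq_true, if_false]
        by_cases hg : g = r.2.1
        · subst hg
          rw [PySem.Dict.getD_modify_self]
          simp [pvPhi]
        · rw [PySem.Dict.getD_modify_of_ne _ _ _ hg]
          rw [if_neg (fun h => hg h.symm)]
          simp
      · have hc' : d.contains r.2.1 = false := by simpa using hc
        have hmem : ¬ r.2.1 ∈ d.keys := by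
          rw [PySem.Dict.contains_eq_decide_mem_keys] at hc'
          simpa using hc'
        rw [hc']
        simp only [Bool.not_false, if_true]
        by_cases hg : g = r.2.1
        · subst hg
          rw [PySem.Dict.getD_insert_self, pvGetDNotMem d _ _ hmem]
          simp [pvPhi]
        · rw [PySem.Dict.getD_insert_of_ne _ _ _ hg]
          rw [if_neg (fun h => hg h.symm)]
          simp
    rw [List.foldl_cons]
    obtain ⟨ihk, ihg⟩ := ih (pvStepA d r)
    constructor
    · rw [ihk, hstep, List.map_cons]
      rfl
    · intro g
      rw [ihg g, hgd g, hgcons g, List.append_assoc]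

theorem pvASort (ks : List String) :
    ∀ d : PySem.Dict String (List (Int × Int)), ks.Nodup → (∀ k ∈ ks, k ∈ d.keys) →
      (ks.foldl pvStepS d).keys = d.keys
      ∧ ∀ g, (ks.foldl pvStepS d).getD g []
          = if g ∈ ks then PySem.List.sorted (d.getD g []) (fun x => x.2) true
            else d.getD g [] := by
  induction ks with
  | nil =>
    intro d _ _
    exact ⟨rfl, fun g => by simp⟩
  | cons k0 t ih =>
    intro d hnd hmem
    rcases List.nodup_cons.mp hnd with ⟨hk0t, hndt⟩
    have hk0 : k0 ∈ d.keys := hmem k0 (by simp)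
    have hc : d.contains k0 = true := by
      rw [PySem.Dict.contains_eq_decide_mem_keys]
      exact decide_eq_true hk0
    have hkeys' : (pvStepS d k0).keys = d.keys := by
      unfold pvStepS
      rw [PySem.Dict.keys_modify, pvKeysInsertMem _ _ _ hc]
    rw [List.foldl_cons]
    obtain ⟨ihk, ihg⟩ := ih (pvStepS d k0) hndt
      (fun k hk => by rw [hkeys']; exact hmem k (by simp [hk]))
    refine ⟨by rw [ihk, hkeys'], ?_⟩
    intro g
    rw [ihg g]
    by_cases hg : g = k0
    · subst hg
      rw [if_neg hk0t, if_pos (by simp)]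
      unfold pvStepS
      rw [PySem.Dict.getD_modify_self]
    · have h1 : (pvStepS d k0).getD g [] = d.getD g [] := by
        unfold pvStepS
        exact PySem.Dict.getD_modify_of_ne _ _ _ hg
      by_cases hgt : g ∈ t
      · rw [if_pos hgt, if_pos (by simp [hgt]), h1]
      · rw [if_neg hgt, if_neg (by simp [hg, hgt]), h1]

theorem pvAOuterSorted (rs : List (Int × String × Int))
    (hpi : rs.Pairwise (fun a b => a.1 < b.1)) :
    PySem.List.sorted ((pvG rs).map (pvSg rs)) (fun x => (x.map (fun x2 => x2.2)).sum) true
      = (pvGord rs).map (pvSg rs) := by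
  have hG := pvGPairwiseFo rs hpi
  have hmapPos : ((pvG rs).map (pvSg rs)).Pairwise
      (fun a b => pvMinIdx a < pvMinIdx b) := by
    rw [List.pairwise_map]
    refine hG.imp_of_mem ?_
    intro g g' hg hg' h
    rw [pvMinIdxSg rs hpi g hg, pvMinIdxSg rs hpi g' hg']
    exact h
  have h1 := pvSortedRevStab (fun x => (x.map (fun x2 => x2.2)).sum) pvMinIdx
    ((pvG rs).map (pvSg rs)) hmapPos
  have h2 : ((pvGord rs).map (pvSg rs)).Pairwise
      (pvLrev (fun x => (x.map (fun x2 => x2.2)).sum) pvMinIdx) := by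
    rw [List.pairwise_map]
    refine (pvGordPairwise rs).imp_of_mem ?_
    intro g g' hg hg' h
    have hmg : g ∈ pvG rs := (PySem.List.mem_sorted _ _ _ _).mp hg
    have hmg' : g' ∈ pvG rs := (PySem.List.mem_sorted _ _ _ _).mp hg'
    unfold pvLrev
    simp only
    rw [pvSumkeySg rs g, pvSumkeySg rs g', pvMinIdxSg rs hpi g hmg, pvMinIdxSg rs hpi g' hmg']
    rcases h with h | ⟨h1, h2⟩
    · exact Or.inl h
    · exact Or.inr ⟨h1, (pvRankLtIffFo rs hpi g g' hmg hmg').mp h2⟩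
  have hperm : (PySem.List.sorted ((pvG rs).map (pvSg rs))
        (fun x => (x.map (fun x2 => x2.2)).sum) true).Perm ((pvGord rs).map (pvSg rs)) := by
    refine (PySem.List.sorted_perm _ _ _).trans ?_
    exact ((PySem.List.sorted_perm (pvG rs) _ false).map (pvSg rs)).symm
  exact List.Perm.eq_of_pairwise
    (fun a b _ _ hab hba => absurd hab (fun h => pvLrevAsymm _ _ _ _ h hba))
    h1 h2 hperm

theorem pvBTot (rs : List (Int × String × Int)) :
    ∀ (d : PySem.Dict String Int) (g : String),
      (rs.foldl pvStepT d).getD g 0 = d.getD g 0 + pvTot rs g := by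
  induction rs with
  | nil =>
    intro d g
    simp [pvTot, pvFilt]
  | cons r t ih =>
    intro d g
    rw [List.foldl_cons, ih]
    have htot : pvTot (r :: t) g = (if r.2.1 = g then r.2.2 else 0) + pvTot t g := by
      unfold pvTot
      rw [pvFiltCons, List.map_append, List.sum_append]
      by_cases h : r.2.1 = g <;> simp [h]
    rw [htot]
    unfold pvStepT
    by_cases hg : g = r.2.1
    · subst hg
      rw [PySem.Dict.getD_insert_self, if_pos rfl]
      ring
    · rw [PySem.Dict.getD_insert_of_ne _ _ _ hg, if_neg (fun h => hg h.symm)]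
      ring

theorem pvBFirst (rs : List (Int × String × Int)) :
    ∀ d : PySem.Dict String Int, (∀ g ∈ d.keys, d.getD g 0 = (d.keys.idxOf g : Nat)) →
      (rs.foldl pvStepF d).keys = PySem.Set.update d.keys (rs.map (fun r => r.2.1))
      ∧ ∀ g ∈ (rs.foldl pvStepF d).keys,
          (rs.foldl pvStepF d).getD g 0 = ((rs.foldl pvStepF d).keys.idxOf g : Nat) := by
  induction rs with
  | nil =>
    intro d hinv
    exact ⟨rfl, hinv⟩
  | cons r t ih =>
    intro d hinv
    rw [List.foldl_cons]
    have hstep : (pvStepF d r).keys = PySem.Set.add d.keys r.2.1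
        ∧ (∀ g ∈ (pvStepF d r).keys, (pvStepF d r).getD g 0 = ((pvStepF d r).keys.idxOf g : Nat)) := by
      unfold pvStepF
      by_cases hc : d.contains r.2.1
      · have hmem : r.2.1 ∈ d.keys := by
          rw [PySem.Dict.contains_eq_decide_mem_keys] at hc
          exact of_decide_eq_true hc
        rw [if_pos hc, pvSetAddEq, if_pos hmem]
        exact ⟨rfl, hinv⟩
      · have hc' : d.contains r.2.1 = false := by simpa using hc
        have hmem : ¬ r.2.1 ∈ d.keys := by
          rw [PySem.Dict.contains_eq_decide_mem_keys] at hc'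
          simpa using hc'
        rw [if_neg hc, pvSetAddEq, if_neg hmem]
        have hkeys : (d.insert r.2.1 (d.size : Int)).keys = d.keys ++ [r.2.1] :=
          pvKeysInsertNew _ _ _ hc'
        refine ⟨hkeys, ?_⟩
        intro g hg
        rw [hkeys] at hg ⊢
        rw [List.idxOf_append]
        by_cases hgr : g = r.2.1
        · subst hgr
          rw [if_neg hmem, PySem.Dict.getD_insert_self, pvSizeEqKeysLength]
          simp
        · have hgk : g ∈ d.keys := by
            rcases List.mem_append.mp hg with h | h
            · exact h
            · exact absurd (List.mem_singleton.mp h) hgr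
          rw [if_pos hgk, PySem.Dict.getD_insert_of_ne _ _ _ hgr]
          exact hinv g hgk
    obtain ⟨ihk, ihg⟩ := ih (pvStepF d r) hstep.2
    refine ⟨?_, ihg⟩
    rw [ihk, hstep.1, List.map_cons]
    rfl

theorem pvBSorted (rs : List (Int × String × Int))
    (hpi : rs.Pairwise (fun a b => a.1 < b.1))
    (k : Int × String × Int → Lex (Int × Lex (Int × Lex (Int × Int))))
    (hk : ∀ r ∈ rs, k r = pvKeyB rs r) :
    PySem.List.sorted rs k false = (pvGord rs).flatMap (pvSgR rs) := by
  -- the flattened blocks are a permutation of the records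
  have hcf : ∀ (r : Int × String × Int) (g : String),
      (pvFilt rs g).count r = if r.2.1 = g then rs.count r else 0 := by
    intro r g
    by_cases h : r.2.1 = g
    · rw [if_pos h]
      exact List.count_filter (by simp [h])
    · rw [if_neg h]
      refine List.count_eq_zero.mpr ?_
      intro hmem
      exact h (pvMemFiltGenre rs g r hmem)
  have hperm : ((pvGord rs).flatMap (pvSgR rs)).Perm rs := by
    rw [List.perm_iff_count]
    intro r
    rw [List.count_flatMap]
    have hmcongr : (pvGord rs).map (List.count r ∘ pvSgR rs)
        = (pvGord rs).map (fun g => if r.2.1 = g then rs.count r else 0) := by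
      apply List.map_congr_left
      intro g _
      have : (pvSgR rs g).count r = (pvFilt rs g).count r :=
        (PySem.List.sorted_perm _ _ _).count_eq r
      simp only [Function.comp]
      rw [this, hcf r g]
    rw [hmcongr]
    have hnd : (pvGord rs).Nodup :=
      (PySem.List.sorted_perm _ _ _).symm.nodup (PySem.Set.nodup_ofList _)
    rw [pvSumIf _ hnd r.2.1 (rs.count r)]
    by_cases hmem : r.2.1 ∈ pvGord rs
    · rw [if_pos hmem]
    · rw [if_neg hmem]
      symm
      refine List.count_eq_zero.mpr ?_
      intro hr
      apply hmem
      unfold pvGord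
      rw [PySem.List.mem_sorted]
      unfold pvG
      rw [PySem.Set.mem_ofList]
      exact List.mem_map.mpr ⟨r, hr, rfl⟩
  -- the flattened blocks are strictly increasing under the composite key
  have hpwKeyB : ((pvGord rs).flatMap (pvSgR rs)).Pairwise
      (fun a b => pvKeyB rs a < pvKeyB rs b) := by
    apply pvPairwiseFlatMap
    · intro g hgord
      have hlrev := pvSortedRevStab (fun r => r.2.2) (fun r => r.1) (pvFilt rs g)
        (pvFiltPairwise rs hpi g)
      refine hlrev.imp_of_mem ?_
      intro a b ha hb h
      have hga : a.2.1 = g := pvMemSgRGenre rs g a ha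
      have hgb : b.2.1 = g := pvMemSgRGenre rs g b hb
      unfold pvKeyB
      rw [hga, hgb, Prod.Lex.lt_iff]
      simp only [ofLex_toLex]
      right
      refine ⟨trivial, ?_⟩
      rw [Prod.Lex.lt_iff]
      simp only [ofLex_toLex]
      right
      refine ⟨trivial, ?_⟩
      rw [Prod.Lex.lt_iff]
      simp only [ofLex_toLex]
      unfold pvLrev at h
      simp only at h
      rcases h with h | ⟨h1, h2⟩
      · left; omega
      · right; exact ⟨by omega, h2⟩
    · refine (pvGordPairwise rs).imp_of_mem ?_
      intro g g' _ _ h a ha b hb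
      have hga : a.2.1 = g := pvMemSgRGenre rs g a ha
      have hgb : b.2.1 = g' := pvMemSgRGenre rs g' b hb
      unfold pvKeyB
      rw [hga, hgb, Prod.Lex.lt_iff]
      simp only [ofLex_toLex]
      rcases h with h | ⟨h1, h2⟩
      · left; omega
      · right
        refine ⟨by omega, ?_⟩
        rw [Prod.Lex.lt_iff]
        simp only [ofLex_toLex]
        left; exact h2
  have hpwK : ((pvGord rs).flatMap (pvSgR rs)).Pairwise (fun a b => k a < k b) := by
    refine hpwKeyB.imp_of_mem ?_
    intro a b ha hb h
    rw [hk a (hperm.mem_iff.mp ha), hk b (hperm.mem_iff.mp hb)]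
    exact h
  exact PySem.List.sorted_eq_of_perm_of_pairwise_lt rs _ k hperm hpwK

theorem pvBlockPass (g : String) :
    ∀ (blk : List (Int × String × Int)) (cnt : PySem.Dict String Int) (ans : List Int),
      (∀ r ∈ blk, r.2.1 = g) →
      (blk.foldl pvStepC (cnt, ans)).2
          = ans ++ (blk.take (2 - cnt.getD g 0).toNat).map (fun r => r.1)
      ∧ ∀ g', g' ≠ g → (blk.foldl pvStepC (cnt, ans)).1.getD g' 0 = cnt.getD g' 0 := by
  intro blk
  induction blk with
  | nil =>
    intro cnt ans _
    simp
  | cons r t ih =>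
    intro cnt ans hall
    have hrg : r.2.1 = g := hall r (by simp)
    have htall : ∀ r' ∈ t, r'.2.1 = g := fun r' hr' => hall r' (by simp [hr'])
    rw [List.foldl_cons]
    by_cases hc : cnt.getD r.2.1 0 < 2
    · have hstep : pvStepC (cnt, ans) r
          = (cnt.insert r.2.1 (cnt.getD r.2.1 0 + 1), ans ++ [r.1]) := by
        unfold pvStepC
        rw [if_pos hc]
      rw [hstep]
      obtain ⟨ih2, ih1⟩ := ih (cnt.insert r.2.1 (cnt.getD r.2.1 0 + 1)) (ans ++ [r.1]) htall
      have hgd : (cnt.insert r.2.1 (cnt.getD r.2.1 0 + 1)).getD g 0 = cnt.getD g 0 + 1 := by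
        rw [← hrg, PySem.Dict.getD_insert_self]
      constructor
      · rw [ih2, hgd]
        have hcg : cnt.getD g 0 < 2 := by rw [← hrg]; exact hc
        have htake : (r :: t).take (2 - cnt.getD g 0).toNat
            = r :: t.take (2 - (cnt.getD g 0 + 1)).toNat := by
          have h2 : (2 - cnt.getD g 0).toNat = (2 - (cnt.getD g 0 + 1)).toNat + 1 := by omega
          rw [h2, List.take_succ_cons]
        rw [htake, List.map_cons, List.append_assoc]
        rfl
      · intro g' hg'
        rw [ih1 g' hg', PySem.Dict.getD_insert_of_ne _ _ _ (by rw [hrg]; exact hg')]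
    · have hstep : pvStepC (cnt, ans) r = (cnt, ans) := by
        unfold pvStepC
        rw [if_neg hc]
      rw [hstep]
      obtain ⟨ih2, ih1⟩ := ih cnt ans htall
      have hcg : ¬ cnt.getD g 0 < 2 := by rw [← hrg]; exact hc
      have htake0 : (2 - cnt.getD g 0).toNat = 0 := by omega
      constructor
      · rw [ih2, htake0]
        simp
      · exact ih1

theorem pvFlatPass (rs : List (Int × String × Int)) :
    ∀ (gs : List String) (cnt : PySem.Dict String Int) (ans : List Int), gs.Nodup →
      (∀ g ∈ gs, cnt.getD g 0 = 0) →
      ((gs.flatMap (fun g => pvSgR rs g)).foldl pvStepC (cnt, ans)).2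
        = ans ++ gs.flatMap (fun g => ((pvSgR rs g).take 2).map (fun r => r.1)) := by
  intro gs
  induction gs with
  | nil =>
    intro cnt ans _ _
    simp
  | cons g t ih =>
    intro cnt ans hnd hz
    rcases List.nodup_cons.mp hnd with ⟨hgt, hndt⟩
    rw [List.flatMap_cons, List.foldl_append]
    obtain ⟨hb2, hb1⟩ := pvBlockPass g (pvSgR rs g) cnt ans (fun r hr => pvMemSgRGenre rs g r hr)
    have hcg : cnt.getD g 0 = 0 := hz g (by simp)
    rw [hcg] at hb2
    have h20 : ((2:Int) - 0).toNat = 2 := rfl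
    rw [h20] at hb2
    have hs : (pvSgR rs g).foldl pvStepC (cnt, ans)
        = ((((pvSgR rs g).foldl pvStepC (cnt, ans)).1), (ans ++ ((pvSgR rs g).take 2).map (fun r => r.1))) := by
      rw [← hb2]
    rw [hs]
    rw [ih _ _ hndt (fun g' hg' => by
      rw [hb1 g' (fun h => hgt (h ▸ hg'))]
      exact hz g' (by simp [hg']))]
    rw [List.flatMap_cons, List.append_assoc]

theorem pvSolutionA (genres : List String) (plays : List Int) :
    solution genres plays
      = (pvGord (pvRecs genres plays)).flatMap
          (fun g => ((pvSgR (pvRecs genres plays) g).take 2).map (fun r => r.1)) := by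
  have hpi := pvRecsPairwise genres plays
  have hport : solution genres plays
      = (PySem.List.sorted
          (((pvRecs genres plays).foldl pvStepA PySem.Dict.empty).keys.foldl pvStepS
            ((pvRecs genres plays).foldl pvStepA PySem.Dict.empty)).values
          (fun x => (x.map (fun x2 => x2.2)).sum) true).foldl
          (fun answer i => (PySem.List.slice i none (some 2)).foldl (fun a j => a ++ [j.1]) answer) [] := by
    unfold solution pvRecs
    rw [List.foldl_map]
    rfl
  rw [hport]
  obtain ⟨hk1, hg1⟩ := pvADict (pvRecs genres plays) PySem.Dict.empty
  have hkeys : ((pvRecs genres plays).foldl pvStepA PySem.Dict.empty).keys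
      = pvG (pvRecs genres plays) := by
    rw [hk1]
    unfold pvG
    rw [PySem.Set.ofList_eq_foldl]
    rfl
  have hgd : ∀ g, ((pvRecs genres plays).foldl pvStepA PySem.Dict.empty).getD g []
      = pvGrp (pvRecs genres plays) g := by
    intro g
    rw [hg1 g]
    rfl
  obtain ⟨hk2, hg2⟩ := pvASort ((pvRecs genres plays).foldl pvStepA PySem.Dict.empty).keys
    ((pvRecs genres plays).foldl pvStepA PySem.Dict.empty)
    (by rw [hkeys]; exact PySem.Set.nodup_ofList _) (fun k hk => hk)
  have hvals : (((pvRecs genres plays).foldl pvStepA PySem.Dict.empty).keys.foldl pvStepS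
        ((pvRecs genres plays).foldl pvStepA PySem.Dict.empty)).values
      = (pvG (pvRecs genres plays)).map (pvSg (pvRecs genres plays)) := by
    rw [PySem.Dict.values_eq_map_keys _ (by rw [hk2, hkeys]; exact PySem.Set.nodup_ofList _) []]
    rw [hk2]
    have hmc : ((pvRecs genres plays).foldl pvStepA PySem.Dict.empty).keys.map
          (fun k => (((pvRecs genres plays).foldl pvStepA PySem.Dict.empty).keys.foldl pvStepS
            ((pvRecs genres plays).foldl pvStepA PySem.Dict.empty)).getD k [])
        = ((pvRecs genres plays).foldl pvStepA PySem.Dict.empty).keys.map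
            (pvSg (pvRecs genres plays)) := by
      apply List.map_congr_left
      intro g hg
      rw [hg2 g, if_pos hg, hgd g]
      rfl
    rw [hmc, hkeys]
  rw [hvals, pvAOuterSorted (pvRecs genres plays) hpi]
  have hinner : ∀ (acc : List Int) (i : List (Int × Int)),
      (PySem.List.slice i none (some 2)).foldl (fun a j => a ++ [j.1]) acc
        = acc ++ (i.take 2).map Prod.fst := by
    intro acc i
    rw [PySem.List.slice_to i (by norm_num : (0:Int) ≤ 2)]
    rw [PySem.List.foldl_append_singleton_eq_map]
    rfl
  rw [PySem.List.foldl_congr_mem _ _ (fun answer i => answer ++ (i.take 2).map Prod.fst) _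
    (fun acc i _ => hinner acc i)]
  rw [PySem.List.foldl_append_eq_flatMap, List.nil_append, List.flatMap_map]
  apply List.flatMap_congr  -- congruence over Gord
  intro g _
  rw [pvSgEqMapSgR, ← List.map_take, List.map_map]
  rfl

theorem pvSolutionB (genres : List String) (plays : List Int) :
    solution_alt genres plays
      = (pvGord (pvRecs genres plays)).flatMap
          (fun g => ((pvSgR (pvRecs genres plays) g).take 2).map (fun r => r.1)) := by
  have hpi := pvRecsPairwise genres plays
  have hport : solution_alt genres plays
      = ((PySem.List.sorted ((pvRecs genres plays).foldl (fun l r => l ++ [r]) [])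
          (fun r => toLex (-(((pvRecs genres plays).foldl pvStepT PySem.Dict.empty).getD r.2.1 0),
            toLex ((((pvRecs genres plays).foldl pvStepF PySem.Dict.empty).getD r.2.1 0 : Int),
              toLex ((-r.2.2 : Int), r.1)))) false).foldl pvStepC
          (PySem.Dict.empty, [])).2 := by
    unfold solution_alt pvRecs
    rw [PySem.List.foldl_prod_mk
      (f := fun (d : PySem.Dict String Int) (e : Int × String) =>
        d.insert e.2 (d.getD e.2 0 + PySem.List.pyGetD plays e.1 0))
      (g := fun (s : PySem.Dict String Int × List (Int × String × Int)) (e : Int × String) =>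
        (if s.1.contains e.2 then s.1 else s.1.insert e.2 (s.1.size : Int),
         s.2 ++ [(e.1, e.2, PySem.List.pyGetD plays e.1 0)]))]
    rw [PySem.List.foldl_prod_mk
      (f := fun (d : PySem.Dict String Int) (e : Int × String) =>
        if d.contains e.2 then d else d.insert e.2 (d.size : Int))
      (g := fun (l : List (Int × String × Int)) (e : Int × String) =>
        l ++ [(e.1, e.2, PySem.List.pyGetD plays e.1 0)])]
    simp only [List.foldl_map]
    rfl
  rw [hport]
  have hrecs : (pvRecs genres plays).foldl (fun l r => l ++ [r]) [] = pvRecs genres plays := by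
    rw [PySem.List.foldl_append_singleton_eq_self]
    rfl
  rw [hrecs]
  -- the first-seen dict
  obtain ⟨hfk, hfg⟩ := pvBFirst (pvRecs genres plays) PySem.Dict.empty (by intro g hg; simp [PySem.Dict.empty, PySem.Dict.keys] at hg)
  have hfkeys : ((pvRecs genres plays).foldl pvStepF PySem.Dict.empty).keys = pvG (pvRecs genres plays) := by
    rw [hfk]
    unfold pvG
    rw [PySem.Set.ofList_eq_foldl]
    rfl
  -- the sort is the concatenation of the per-genre blocks
  rw [pvBSorted (pvRecs genres plays) hpi _ ?hk]
  case hk =>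
    intro r hr
    unfold pvKeyB
    have ht : ((pvRecs genres plays).foldl pvStepT PySem.Dict.empty).getD r.2.1 0
        = pvTot (pvRecs genres plays) r.2.1 := by
      rw [pvBTot (pvRecs genres plays) PySem.Dict.empty r.2.1]
      simp [PySem.Dict.getD, PySem.Dict.get?, PySem.Dict.empty]
    have hmemG : r.2.1 ∈ pvG (pvRecs genres plays) := by
      unfold pvG
      rw [PySem.Set.mem_ofList]
      exact List.mem_map.mpr ⟨r, hr, rfl⟩
    have hf : ((pvRecs genres plays).foldl pvStepF PySem.Dict.empty).getD r.2.1 0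
        = pvRank (pvRecs genres plays) r.2.1 := by
      rw [hfg r.2.1 (by rw [hfkeys]; exact hmemG)]
      unfold pvRank
      rw [hfkeys]
    rw [ht, hf]
  -- the counting pass keeps the first two of each block
  rw [pvFlatPass (pvRecs genres plays) (pvGord (pvRecs genres plays)) PySem.Dict.empty []
    ((PySem.List.sorted_perm _ _ _).symm.nodup (PySem.Set.nodup_ofList _))
    (fun g _ => rfl)]
  rfl

theorem solution_spec : Claim_equal_solution := by
  intro genres plays _ _
  unfold Spec_solution
  rw [pvSolutionA, pvSolutionB]
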